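-- pv_equiv track=rewrite | github.com/w25536/leetcode_python | 프로그래머스/unrated/181874. A 강조하기/A 강조하기.py | solution
-- ===== SOURCE A (Python) =====
-- def solution(myString):
--     answer = ''
--
--     for char in myString :
--         if char == 'a':
--             answer+= 'A'
--         elif char.upper() and char != 'A':
--             answer += char.lower()
--         else:
--             answer += char
--
--
--
--     return answer
-- ===== SOURCE B (Python) =====
-- def solution(myString):
--     return myString.lower().replace('a', 'A')
-- ===== Notes on version B (the rewrite author's own statement) =====
-- stated objective: simpler
-- what changed: Replaces the per-character accumulator loop with two whole-string library passes: lowercase the string, then replace every lowercase letter a with its uppercase form.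
import Mathlib
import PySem

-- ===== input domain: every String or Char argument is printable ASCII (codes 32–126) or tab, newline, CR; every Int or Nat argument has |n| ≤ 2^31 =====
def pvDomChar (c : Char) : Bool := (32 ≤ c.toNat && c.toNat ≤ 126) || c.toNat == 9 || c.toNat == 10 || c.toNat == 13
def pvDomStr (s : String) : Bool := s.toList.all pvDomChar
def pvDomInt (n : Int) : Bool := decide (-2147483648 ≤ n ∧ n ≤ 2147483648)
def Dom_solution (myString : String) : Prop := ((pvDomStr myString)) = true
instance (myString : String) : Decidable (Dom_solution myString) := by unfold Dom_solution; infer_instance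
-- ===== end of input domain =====

-- B replaces A's per-character accumulator loop with two whole-string passes: lower() then replace('a','A') (objective: simpler).

-- ===== PORT A =====
def solution (myString : String) : String :=
  myString.toList.foldl
    (fun answer char =>
      if char = 'a' then answer ++ "A"
      else if PySem.Str.len (PySem.Str.upper (String.ofList [char])) ≠ 0 ∧ char ≠ 'A' then
        answer ++ PySem.Str.lower (String.ofList [char])
      else answer ++ String.ofList [char])
    ""

-- ===== PORT B =====
def solution_alt (myString : String) : String :=
  PySem.Str.replace (PySem.Str.lower myString) "a" "A"

-- ===== PRECONDITION & SPEC =====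
def Spec_solution (myString : String) (out : String) : Prop := out = solution_alt myString
instance (myString : String) (out : String) : Decidable (Spec_solution myString out) := by unfold Spec_solution; infer_instance

-- ===== CLAIM (what is proved, stated in full; the proofs are below) =====
def Claim_equal_solution : Prop := ∀ (myString : String), Dom_solution myString → Spec_solution myString (solution myString)

-- ===== LEMMAS AND PROOFS =====

-- A's per-character result, as a single map function
def pvF (c : Char) : Char :=
  if c = 'a' then 'A' else if c ≠ 'A' then PySem.Chars.lowerChar c else c

-- A's loop appends pvF of each char
theorem solution_foldl (l : List Char) (acc : String) :
    (l.foldl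
      (fun answer char =>
        if char = 'a' then answer ++ "A"
        else if PySem.Str.len (PySem.Str.upper (String.ofList [char])) ≠ 0 ∧ char ≠ 'A' then
          answer ++ PySem.Str.lower (String.ofList [char])
        else answer ++ String.ofList [char])
      acc).toList = acc.toList ++ l.map pvF := by
  induction l generalizing acc with
  | nil => simp
  | cons c t ih =>
    simp only [List.foldl_cons, List.map_cons]
    by_cases h1 : c = 'a'
    · subst h1; rw [ih]; simp [pvF]
    · by_cases h2 : c = 'A'
      · subst h2
        rw [if_neg h1, if_neg (by simp), ih]
        simp [pvF]
      · rw [if_neg h1, if_pos ⟨by simp [PySem.Str.len, PySem.Str.upper, PySem.Chars.upper], h2⟩, ih]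
        simp [pvF, h1, h2, PySem.Str.lower, PySem.Chars.lower]

-- replace with single-char pattern 'a' is a map
theorem replace_go_map (l : List Char) (fuel : Nat) (acc : List Char)
    (h : l.length ≤ fuel) :
    PySem.Chars.replace.go ['a'] ['A'] fuel l acc =
      acc.reverse ++ l.map (fun c => if c = 'a' then 'A' else c) := by
  induction l generalizing fuel acc with
  | nil => cases fuel <;> simp [PySem.Chars.replace.go]
  | cons c t ih =>
    cases fuel with
    | zero => simp at h
    | succ n =>
      rw [PySem.Chars.replace.go]
      by_cases hc : c = 'a'
      · subst hc
        rw [if_pos (by simp [List.isPrefixOf]),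
          show List.drop ['a'].length ('a' :: t) = t from rfl]
        simp only [List.length_cons] at h
        rw [ih _ _ (by omega)]
        simp
      · rw [if_neg (by simpa [List.isPrefixOf] using fun h : 'a' = c => hc h.symm)]
        simp only [List.length_cons] at h
        rw [ih _ _ (by omega)]
        simp [hc]

theorem replace_a_map (l : List Char) :
    PySem.Chars.replace l ['a'] ['A'] = l.map (fun c => if c = 'a' then 'A' else c) := by
  rw [PySem.Chars.replace]
  simp only [List.isEmpty_cons, Bool.false_eq_true, if_false]
  exact replace_go_map l l.length [] le_rfl

-- lowerChar sends only 'a' and 'A' to 'a'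
theorem lowerChar_eq_a {c : Char} (h : PySem.Chars.lowerChar c = 'a') : c = 'a' ∨ c = 'A' := by
  unfold PySem.Chars.lowerChar PySem.Chars.isupper at h
  split_ifs at h with hu
  · right
    simp only [Bool.and_eq_true, decide_eq_true_eq] at hu
    have h1 : 65 ≤ c.toNat := by simpa [Char.le_def, UInt32.le_iff_toNat_le] using hu.1
    have h2 : c.toNat ≤ 90 := by simpa [Char.le_def, UInt32.le_iff_toNat_le] using hu.2
    have hv : Nat.isValidChar (c.toNat + 32) := Or.inl (by omega)
    have ht := congrArg Char.toNat h
    rw [Char.toNat_ofNat, if_pos hv, show ('a' : Char).toNat = 97 from rfl] at ht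
    have h65 : c.toNat = 65 := by omega
    have := Char.ofNat_toNat c
    rw [h65] at this
    exact this.symm
  · left; exact h

theorem pvF_eq_comp (c : Char) :
    (if PySem.Chars.lowerChar c = 'a' then 'A' else PySem.Chars.lowerChar c) = pvF c := by
  unfold pvF
  by_cases h1 : c = 'a'
  · subst h1; simp [PySem.Chars.lowerChar, PySem.Chars.isupper]
  · by_cases h2 : c = 'A'
    · subst h2; simp [PySem.Chars.lowerChar, PySem.Chars.isupper]
    · rw [if_neg h1, if_pos h2]
      rw [if_neg (fun h => by rcases lowerChar_eq_a h with h | h <;> [exact h1 h; exact h2 h])]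

-- ===== VERDICT (by name: the statement is the Claim_ definition above) =====
theorem solution_spec : Claim_equal_solution := by
  intro s _
  unfold Spec_solution solution solution_alt
  apply String.toList_injective
  rw [solution_foldl]
  rw [PySem.Str.toList_replace, PySem.Str.toList_lower]
  show s.toList.map pvF = PySem.Chars.replace (PySem.Chars.lower s.toList) _ _
  have : ("a" : String).toList = ['a'] := by decide
  rw [this, (by decide : ("A" : String).toList = ['A']), replace_a_map,
    PySem.Chars.lower, List.map_map]
  exact (List.map_congr_left fun c _ => (pvF_eq_comp c).symm)
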